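-- pv_equiv track=rewrite | github.com/yunhe-bai-SDU/homework-2025-7 | project_6/Google Password Checkup PoC_扩展.py | build_bucket_index
-- ===== SOURCE A (Python) =====
-- def build_bucket_index(db, bucket_size=4):
--     """将哈希按前 bucket_size 位分桶"""
--     bucket_index = {}
--     for h in db:
--         prefix = h[:bucket_size]
--         if prefix not in bucket_index:
--             bucket_index[prefix] = []
--         bucket_index[prefix].append(h)
--     return bucket_index
-- ===== SOURCE B (Python) =====
-- def build_bucket_index(db, bucket_size=4):
--     """将哈希按前 bucket_size 位分桶 — two-pass: ordered-distinct prefixes, then one filter per prefix"""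
--     prefixes = list(dict.fromkeys(h[:bucket_size] for h in db))
--     return {p: [h for h in db if h[:bucket_size] == p] for p in prefixes}
-- ===== Notes on version B (the rewrite author's own statement) =====
-- stated objective: alternative
-- what changed: A builds the buckets in one accumulating dict pass (create-if-absent then append); B first computes the distinct prefixes in first-occurrence order via dict.fromkeys and then builds the result with a dict comprehension that filters db once per prefix.
import Mathlib
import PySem

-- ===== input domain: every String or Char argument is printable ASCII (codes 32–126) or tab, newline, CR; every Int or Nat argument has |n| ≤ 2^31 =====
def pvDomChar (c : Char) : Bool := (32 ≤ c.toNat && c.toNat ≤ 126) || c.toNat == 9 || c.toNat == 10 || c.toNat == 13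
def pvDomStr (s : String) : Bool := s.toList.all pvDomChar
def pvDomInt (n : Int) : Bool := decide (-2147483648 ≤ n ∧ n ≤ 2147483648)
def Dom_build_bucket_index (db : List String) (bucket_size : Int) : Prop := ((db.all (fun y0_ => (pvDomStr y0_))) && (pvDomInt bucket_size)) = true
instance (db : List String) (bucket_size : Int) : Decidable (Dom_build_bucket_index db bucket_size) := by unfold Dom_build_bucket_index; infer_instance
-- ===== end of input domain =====

-- B replaces A's single accumulating dict pass by a two-pass decomposition (ordered-distinct
-- prefixes first, then one filter of db per prefix); objective: alternative (not faster).

-- ===== PORT A =====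
-- A: one pass; for each h, ensure bucket for h[:bucket_size] exists, then append h to it.
def build_bucket_index (db : List String) (bucket_size : Int) : List (String × List String) :=
  (db.foldl
    (fun bucket_index h =>
      let pfx := PySem.Str.slice h none (some bucket_size)
      let bucket_index :=
        if bucket_index.contains pfx then bucket_index
        else bucket_index.insert pfx []
      bucket_index.modify pfx [] (fun l => l ++ [h]))
    PySem.Dict.empty).items

-- ===== PORT B =====
-- B: distinct prefixes in first-occurrence order (dict.fromkeys), then a dict comprehension
-- assigning to each prefix the sub-list of db with that prefix.
def build_bucket_index_alt (db : List String) (bucket_size : Int) : List (String × List String) :=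
  let prefixes := PySem.List.dedup (db.map (fun h => PySem.Str.slice h none (some bucket_size)))
  (prefixes.foldl
    (fun d p => d.insert p (db.filter (fun h => PySem.Str.slice h none (some bucket_size) == p)))
    PySem.Dict.empty).items

-- ===== PRECONDITION & SPEC =====
def Spec_build_bucket_index (db : List String) (bucket_size : Int) (out : List (String × List String)) : Prop := out = build_bucket_index_alt db bucket_size
instance (db : List String) (bucket_size : Int) (out : List (String × List String)) : Decidable (Spec_build_bucket_index db bucket_size out) := by unfold Spec_build_bucket_index; infer_instance

-- ===== CLAIM (what is proved, stated in full; the proofs are below) =====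
def Claim_equal_build_bucket_index : Prop := ∀ (db : List String) (bucket_size : Int), Dom_build_bucket_index db bucket_size → Spec_build_bucket_index db bucket_size (build_bucket_index db bucket_size)

-- ===== LEMMAS AND PROOFS =====

-- A's guarded "create empty bucket then append" step is exactly one Dict.modify with default [].
theorem stepA_eq_modify (d : PySem.Dict String (List String)) (p h : String) :
    (if d.contains p then d else d.insert p []).modify p [] (fun l => l ++ [h])
      = d.modify p [] (fun l => l ++ [h]) := by
  by_cases hc : d.contains p = true
  · simp [hc]
  · simp only [hc, Bool.false_eq_true, if_false]
    simp [PySem.Dict.modify, PySem.Dict.insert_insert_self,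
      PySem.Dict.getD_of_not_contains d [] (eq_false_of_ne_true hc)]

theorem build_bucket_index_eq (db : List String) (bucket_size : Int) :
    build_bucket_index db bucket_size = build_bucket_index_alt db bucket_size := by
  have hA : build_bucket_index db bucket_size
      = ((db.map (fun h => (PySem.Str.slice h none (some bucket_size), h))).foldl
          (fun d p => d.modify p.1 [] (fun l => l ++ [p.2])) PySem.Dict.empty).items := by
    unfold build_bucket_index
    rw [List.foldl_map]
    simp only [stepA_eq_modify]
  set D := (db.map (fun h => (PySem.Str.slice h none (some bucket_size), h))).foldl
      (fun d p => d.modify p.1 [] (fun l => l ++ [p.2])) PySem.Dict.empty with hD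
  have hnd : D.keys.Nodup := by
    rw [hD]
    exact PySem.Dict.nodup_keys_foldl_modify_key _ (fun p : String × String => p.1) [] (fun (_ : PySem.Dict String (List String)) (p : String × String) (l : List String) => l ++ [p.2]) _ (by simp)
  have hkeys : D.keys = PySem.Set.ofList (db.map (fun h => PySem.Str.slice h none (some bucket_size))) := by
    rw [hD, PySem.Dict.keys_foldl_modify_key _ (fun p : String × String => p.1) [] (fun (_ : PySem.Dict String (List String)) (p : String × String) (l : List String) => l ++ [p.2])]
    simp [PySem.Dict.keys, PySem.Dict.empty, PySem.Set.update_nil_left, List.map_map, Function.comp_def]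
  have hget : ∀ k, D.getD k [] = db.filter (fun h => PySem.Str.slice h none (some bucket_size) == k) := by
    intro k
    rw [hD, PySem.Dict.getD_foldl_modify_append _ PySem.Dict.empty k, List.filter_map]
    simp [List.map_map, Function.comp_def]
  have hitems : D.items
      = (PySem.Set.ofList (db.map (fun h => PySem.Str.slice h none (some bucket_size)))).map
          (fun k => (k, db.filter (fun h => PySem.Str.slice h none (some bucket_size) == k))) := by
    rw [PySem.Dict.items_eq_map_keys D hnd [], hkeys]
    exact List.map_congr_left (fun k _ => by rw [hget k])
  have hB : build_bucket_index_alt db bucket_size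
      = (PySem.Set.ofList (db.map (fun h => PySem.Str.slice h none (some bucket_size)))).map
          (fun k => (k, db.filter (fun h => PySem.Str.slice h none (some bucket_size) == k))) := by
    show ((PySem.List.dedup (db.map (fun h => PySem.Str.slice h none (some bucket_size)))).foldl
        (fun d p => d.insert p (db.filter (fun h => PySem.Str.slice h none (some bucket_size) == p)))
        PySem.Dict.empty).items = _
    rw [PySem.Dict.items_foldl_insert_fresh
        (PySem.List.dedup (db.map (fun h => PySem.Str.slice h none (some bucket_size))))
        (fun p => p)
        (fun p => db.filter (fun h => PySem.Str.slice h none (some bucket_size) == p))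
        PySem.Dict.empty (by intro a _; simp) (by simp [PySem.Set.nodup_ofList])]
    simp [PySem.Dict.empty]
  rw [hA, hitems, hB]

-- ===== VERDICT (by name: the statement is the Claim_ definition above) =====
theorem build_bucket_index_spec : Claim_equal_build_bucket_index := by
  intro db bs _
  unfold Spec_build_bucket_index
  exact build_bucket_index_eq db bs
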